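-- pv_equiv track=rewrite | github.com/yihaohu0118/tau2-bench-test | src/tau2/voice/utils/transcript_utils.py | _assign_transcripts_to_segments
-- ===== SOURCE A (Python) =====
-- def _assign_transcripts_to_segments(
--     merged_transcripts: list[tuple[int, int, str]],
--     segments: list[list[tuple]],
-- ) -> list[list[int]]:
--     """Assign each merged transcript to a segment.
--
--     Returns list of transcript indices for each segment.
--     """
--     segment_transcripts: list[list[int]] = [[] for _ in segments]
--     assigned: set[int] = set()
--
--     for seg_idx, segment in enumerate(segments):
--         seg_start = segment[0][1]
--         seg_end = segment[-1][2]
--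
--         for t_idx, (start_ms, end_ms, _) in enumerate(merged_transcripts):
--             if t_idx in assigned:
--                 continue
--
--             has_overlap = not (end_ms <= seg_start or start_ms >= seg_end)
--             ended_before = end_ms <= seg_start
--
--             if has_overlap or ended_before:
--                 segment_transcripts[seg_idx].append(t_idx)
--                 assigned.add(t_idx)
--
--     # Unassigned transcripts go to last segment
--     for t_idx in range(len(merged_transcripts)):
--         if t_idx not in assigned:
--             segment_transcripts[-1].append(t_idx)
--
--     return segment_transcripts
-- ===== SOURCE B (Python) =====
-- def _assign_transcripts_to_segments(
--     merged_transcripts: list[tuple[int, int, str]],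
--     segments: list[list[tuple]],
-- ) -> list[list[int]]:
--     """Assign each merged transcript to a segment.
--
--     Returns list of transcript indices for each segment.
--     """
--     bounds = [(seg[0][1], seg[-1][2]) for seg in segments]
--
--     def first_match(start_ms, end_ms):
--         # A's per-segment test simplifies to: end_ms <= seg_start or start_ms < seg_end
--         for j, (seg_start, seg_end) in enumerate(bounds):
--             if end_ms <= seg_start or start_ms < seg_end:
--                 return j
--         return None
--
--     fm = [first_match(start_ms, end_ms) for start_ms, end_ms, _ in merged_transcripts]
--     out = [[t for t, f in enumerate(fm) if f == j] for j in range(len(segments))]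
--     if any(f is None for f in fm):
--         # transcripts matching no segment go to the last segment, after its own
--         out[-1].extend(t for t, f in enumerate(fm) if f is None)
--     return out
-- ===== Notes on version B (the rewrite author's own statement) =====
-- stated objective: alternative
-- what changed: Replaces A's stateful per-segment sweep with an assigned-set by a stateless two-phase computation: precompute each transcript's first matching segment (the test simplifies to end<=seg_start or start<seg_end, with early exit) and bucket indices by that value, leftovers appended to the last bucket.
import Mathlib
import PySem

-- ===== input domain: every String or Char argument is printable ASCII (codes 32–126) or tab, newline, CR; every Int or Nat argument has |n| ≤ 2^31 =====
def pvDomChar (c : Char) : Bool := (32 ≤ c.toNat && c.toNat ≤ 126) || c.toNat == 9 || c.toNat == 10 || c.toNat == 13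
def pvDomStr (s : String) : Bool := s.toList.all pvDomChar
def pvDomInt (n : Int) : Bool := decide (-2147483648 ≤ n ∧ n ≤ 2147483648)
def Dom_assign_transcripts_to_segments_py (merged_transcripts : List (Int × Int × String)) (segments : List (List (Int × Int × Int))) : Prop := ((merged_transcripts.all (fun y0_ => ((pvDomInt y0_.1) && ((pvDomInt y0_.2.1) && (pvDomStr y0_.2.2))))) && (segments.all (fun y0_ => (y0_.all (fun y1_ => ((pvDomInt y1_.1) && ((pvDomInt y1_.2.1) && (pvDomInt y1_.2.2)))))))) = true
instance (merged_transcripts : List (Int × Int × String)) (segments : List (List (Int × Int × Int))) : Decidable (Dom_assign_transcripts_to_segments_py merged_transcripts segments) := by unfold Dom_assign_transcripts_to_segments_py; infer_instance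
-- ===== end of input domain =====

-- B replaces A's stateful per-segment sweep with an assigned-set by a stateless two-phase
-- computation (first matching segment per transcript, then bucketing); same cost class, objective: alternative.

-- ===== PORT A =====
-- inner loop body: `for t_idx, (start_ms, end_ms, _) in enumerate(merged_transcripts): …`
def pvInnerA (seg_start seg_end : Int) (seg_idx : Int)
    (acc2 : List (List Int) × PySem.Set Int) (q : Int × (Int × Int × String)) :
    List (List Int) × PySem.Set Int :=
  if PySem.Set.contains acc2.2 q.1 then acc2
  else
    let has_overlap := !(decide (q.2.2.1 ≤ seg_start) || decide (q.2.1 ≥ seg_end))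
    let ended_before := decide (q.2.2.1 ≤ seg_start)
    if has_overlap || ended_before then
      (PySem.List.pySetD acc2.1 seg_idx (PySem.List.pyGetD acc2.1 seg_idx [] ++ [q.1]),
       PySem.Set.add acc2.2 q.1)
    else acc2

-- outer loop body: `for seg_idx, segment in enumerate(segments): …`
def pvOuterA (merged_transcripts : List (Int × Int × String))
    (acc : List (List Int) × PySem.Set Int) (seg : Int × List (Int × Int × Int)) :
    List (List Int) × PySem.Set Int :=
  let seg_start := ((PySem.List.pyGet? seg.2 0).getD (0, 0, 0)).2.1      -- segment[0][1]  (IndexError on [] excluded by Pre_)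
  let seg_end := ((PySem.List.pyGet? seg.2 (-1)).getD (0, 0, 0)).2.2    -- segment[-1][2]
  (PySem.List.enumerate merged_transcripts).foldl (pvInnerA seg_start seg_end seg.1) acc

def assign_transcripts_to_segments_py (merged_transcripts : List (Int × Int × String)) (segments : List (List (Int × Int × Int))) : List (List Int) :=
  let st := (PySem.List.enumerate segments).foldl (pvOuterA merged_transcripts)
    (segments.map (fun _ => ([] : List Int)), (PySem.Set.empty : PySem.Set Int))
  -- `for t_idx in range(len(merged_transcripts)): if t_idx not in assigned: segment_transcripts[-1].append(t_idx)`
  (PySem.List.pyRange 0 (merged_transcripts.length : Int) 1).foldl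
    (fun bs t_idx =>
      if PySem.Set.contains st.2 t_idx then bs
      else PySem.List.pySetD bs (-1) (PySem.List.pyGetD bs (-1) [] ++ [t_idx]))
    st.1

-- ===== PORT B =====
def assign_transcripts_to_segments_py_alt (merged_transcripts : List (Int × Int × String)) (segments : List (List (Int × Int × Int))) : List (List Int) :=
  let bounds := segments.map (fun seg =>
    (((PySem.List.pyGet? seg 0).getD (0, 0, 0)).2.1, ((PySem.List.pyGet? seg (-1)).getD (0, 0, 0)).2.2))
  let first_match := fun (start_ms end_ms : Int) =>
    ((PySem.List.enumerate bounds).find? (fun jp =>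
        decide (end_ms ≤ jp.2.1) || decide (start_ms < jp.2.2))).map (·.1)
  let fm := merged_transcripts.map (fun t => first_match t.1 t.2.1)
  let out := (PySem.List.pyRange 0 (segments.length : Int) 1).map (fun j =>
    ((PySem.List.enumerate fm).filter (fun p => p.2 == some j)).map (·.1))
  if fm.any (·.isNone) then
    PySem.List.pySetD out (-1) (PySem.List.pyGetD out (-1) [] ++
      ((PySem.List.enumerate fm).filter (fun p => p.2.isNone)).map (·.1))
  else out

-- ===== PRECONDITION & SPEC =====
-- Pre_ excludes exactly the inputs where A raises IndexError: an empty inner segment list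
-- (segment[0]), or empty `segments` with transcripts left over (segment_transcripts[-1]).
def Pre_assign_transcripts_to_segments_py (merged_transcripts : List (Int × Int × String)) (segments : List (List (Int × Int × Int))) : Prop :=
  (∀ seg ∈ segments, seg ≠ []) ∧ (segments = [] → merged_transcripts = [])
instance (merged_transcripts : List (Int × Int × String)) (segments : List (List (Int × Int × Int))) : Decidable (Pre_assign_transcripts_to_segments_py merged_transcripts segments) := by unfold Pre_assign_transcripts_to_segments_py; infer_instance

def pvWitness_assign_transcripts_to_segments_py : (List (Int × Int × String)) × (List (List (Int × Int × Int))) :=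
  ([(0, 5, "a")], [[(0, 0, 10)]])

def Spec_assign_transcripts_to_segments_py (merged_transcripts : List (Int × Int × String)) (segments : List (List (Int × Int × Int))) (out : List (List Int)) : Prop := out = assign_transcripts_to_segments_py_alt merged_transcripts segments
instance (merged_transcripts : List (Int × Int × String)) (segments : List (List (Int × Int × Int))) (out : List (List Int)) : Decidable (Spec_assign_transcripts_to_segments_py merged_transcripts segments out) := by unfold Spec_assign_transcripts_to_segments_py; infer_instance

-- ===== CLAIM (what is proved, stated in full; the proofs are below) =====
def Claim_equal_assign_transcripts_to_segments_py : Prop := ∀ (merged_transcripts : List (Int × Int × String)) (segments : List (List (Int × Int × Int))), Dom_assign_transcripts_to_segments_py merged_transcripts segments → Pre_assign_transcripts_to_segments_py merged_transcripts segments → Spec_assign_transcripts_to_segments_py merged_transcripts segments (assign_transcripts_to_segments_py merged_transcripts segments)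

-- ===== LEMMAS AND PROOFS =====

-- canonical per-segment bounds, match condition, first matching segment, buckets
def pvBound (seg : List (Int × Int × Int)) : Int × Int :=
  (((PySem.List.pyGet? seg 0).getD (0, 0, 0)).2.1, ((PySem.List.pyGet? seg (-1)).getD (0, 0, 0)).2.2)

def pvCond (t : Int × Int × String) (b : Int × Int) : Bool :=
  decide (t.2.1 ≤ b.1) || decide (t.1 < b.2)

def pvFm (bnds : List (Int × Int)) (t : Int × Int × String) : Option Int :=
  Option.map (fun n : Nat => (n : Int)) (List.findIdx? (pvCond t) bnds)

def pvMt (merged : List (Int × Int × String)) (bnds : List (Int × Int)) (j : Nat) : List Int :=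
  ((PySem.List.enumerate merged).filter (fun q => pvFm bnds q.2 == some (j : Int))).map (·.1)

def pvUm (merged : List (Int × Int × String)) (bnds : List (Int × Int)) : List Int :=
  ((PySem.List.enumerate merged).filter (fun q => (pvFm bnds q.2).isNone)).map (·.1)

def pvAsgB (bnds : List (Int × Int)) (k : Nat) (t : Int × Int × String) : Bool :=
  (bnds.take k).any (fun b => pvCond t b)

-- A's per-transcript test equals the simplified condition
theorem pvCondA_eq (st en s e : Int) :
    (!(decide (en ≤ s) || decide (st ≥ e)) || decide (en ≤ s)) = (decide (en ≤ s) || decide (st < e)) := by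
  by_cases h1 : en ≤ s <;> by_cases h2 : st < e <;> simp [h1, h2] <;> omega

theorem pvEnum_map {α β : Type} (f : α → β) (xs : List α) (s : Int) :
    PySem.List.enumerate (xs.map f) s = (PySem.List.enumerate xs s).map (fun q => (q.1, f q.2)) := by
  induction xs generalizing s with
  | nil => simp [PySem.List.enumerate_nil]
  | cons x xs ih => simp [PySem.List.enumerate_cons, ih]

theorem pvFind?_enum {α : Type} (p : α → Bool) (xs : List α) (s : Int) :
    ((PySem.List.enumerate xs s).find? (fun jp => p jp.2)).map (·.1)
      = (List.findIdx? p xs).map (fun n => s + (n : Int)) := by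
  induction xs generalizing s with
  | nil => simp [PySem.List.enumerate_nil]
  | cons x xs ih =>
    rw [PySem.List.enumerate_cons, List.find?_cons, List.findIdx?_cons]
    cases h : p x with
    | true => simp
    | false =>
      simp only []
      rw [ih (s := s + 1)]
      cases List.findIdx? p xs <;> simp <;> ring

theorem pvEnum_fst_nodup {α : Type} (xs : List α) (s : Int) :
    ((PySem.List.enumerate xs s).map (·.1)).Nodup := by
  have h := PySem.List.pairwise_lt_enumerate xs s
  exact (List.pairwise_map.mpr h).imp ne_of_lt

theorem pvEnum_fst_inj {α : Type} {xs : List α} {s : Int} {q q' : Int × α}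
    (h : q ∈ PySem.List.enumerate xs s) (h' : q' ∈ PySem.List.enumerate xs s) (he : q.1 = q'.1) :
    q = q' := by
  rw [PySem.List.mem_enumerate_iff] at h h'
  obtain ⟨k, hk, rfl⟩ := h
  obtain ⟨k', hk', rfl⟩ := h'
  simp only at he ⊢
  have : k = k' := by omega
  subst this; rfl

theorem pvPick_eq (bnds : List (Int × Int)) (k : Nat) (hk : k < bnds.length) (t : Int × Int × String) :
    (!pvAsgB bnds k t && pvCond t bnds[k]) = (pvFm bnds t == some (k : Int)) := by
  unfold pvFm pvAsgB
  rcases h : List.findIdx? (pvCond t) bnds with _ | n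
  · rw [List.findIdx?_eq_none_iff] at h
    simp [h bnds[k] (List.getElem_mem hk)]
  · obtain ⟨hn, hpn, hprev⟩ := (List.findIdx?_eq_some_iff_getElem (xs := bnds) (p := pvCond t) (i := n)).mp h
    have hrhs2 : (Option.map (fun n : Nat => (n : Int)) (some n) == some (k : Int)) = decide (n = k) := by
      simp [beq_eq_decide]
    rw [hrhs2]
    by_cases hkn : n = k
    · have hall : (bnds.take k).any (fun b => pvCond t b) = false := by
        refine List.any_eq_false.mpr ?_
        intro b hb
        rw [List.mem_take_iff_getElem] at hb
        obtain ⟨i, hi, rfl⟩ := hb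
        simpa using hprev i (by omega)
      rw [hall]
      subst hkn
      simp [hpn]
    · rcases Nat.lt_or_ge n k with hlt | hge
      · have hany : (bnds.take k).any (fun b => pvCond t b) = true := by
          refine List.any_eq_true.mpr ⟨bnds[n], ?_, hpn⟩
          rw [List.mem_take_iff_getElem]
          exact ⟨n, by omega, rfl⟩
        simp [hany, hkn]
      · have hk' : pvCond t bnds[k] = false := by
          simpa using hprev k (by omega)
        simp [hk', hkn]

theorem pvFm_none_iff (bnds : List (Int × Int)) (t : Int × Int × String) :
    (pvFm bnds t).isNone = !bnds.any (fun b => pvCond t b) := by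
  unfold pvFm
  rcases h : List.findIdx? (pvCond t) bnds with _ | n
  · rw [List.findIdx?_eq_none_iff] at h
    have hany : bnds.any (fun b => pvCond t b) = false := by
      refine List.any_eq_false.mpr ?_
      intro b hb
      simpa using h b hb
    simp [hany]
  · obtain ⟨hn, hpn, -⟩ := (List.findIdx?_eq_some_iff_getElem (xs := bnds) (p := pvCond t) (i := n)).mp h
    have hany : bnds.any (fun b => pvCond t b) = true := List.any_eq_true.mpr ⟨bnds[n], List.getElem_mem hn, hpn⟩
    simp [hany]

theorem pvSetD_neg_one {α : Type} (ys : List α) (y v : α) :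
    PySem.List.pySetD (ys ++ [y]) (-1) v = ys ++ [v] := by
  simp [PySem.List.pySetD, PySem.List.pySet?, PySem.List.pyIdx?]

theorem pvGetD_neg_one {α : Type} (ys : List α) (y d : α) :
    PySem.List.pyGetD (ys ++ [y]) (-1) d = y := by
  simp [PySem.List.pyGetD, PySem.List.pyGet?_neg_one_append_singleton]

-- A's inner loop over one segment, characterised
theorem pvInnerA_spec (s e : Int) (k : Nat) :
    ∀ (L : List (Int × (Int × Int × String))) (bs : List (List Int)) (asg : PySem.Set Int),
    (L.map (·.1)).Nodup → ∀ (hk : k < bs.length),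
    L.foldl (pvInnerA s e (k : Int)) (bs, asg)
      = (bs.set k (bs[k] ++ (L.filter (fun q => !PySem.Set.contains asg q.1 && pvCond q.2 (s, e))).map (·.1)),
         PySem.Set.update asg ((L.filter (fun q => !PySem.Set.contains asg q.1 && pvCond q.2 (s, e))).map (·.1))) := by
  intro L
  induction L with
  | nil =>
    intro bs asg _ hk
    simp [PySem.Set.update, List.set_getElem_self]
  | cons q L ih =>
    intro bs asg hnd hk
    have hndt : (L.map (·.1)).Nodup := by simpa using hnd.of_cons
    have hqnot : ∀ q' ∈ L, q'.1 ≠ q.1 := by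
      intro q' hq' heq
      have hmem : q.1 ∈ L.map (·.1) := List.mem_map.mpr ⟨q', hq', heq⟩
      rw [List.map_cons, List.nodup_cons] at hnd
      exact hnd.1 hmem
    rw [List.foldl_cons]
    by_cases hc : PySem.Set.contains asg q.1
    · rw [show pvInnerA s e (k : Int) (bs, asg) q = (bs, asg) by unfold pvInnerA; rw [if_pos hc]]
      rw [ih bs asg hndt hk]
      have hc' := (PySem.Set.contains_iff asg q.1).mp hc
      simp [List.filter_cons, hc']
    · by_cases hcond : pvCond q.2 (s, e)
      · have hstep : pvInnerA s e (k : Int) (bs, asg) q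
            = (bs.set k (bs[k] ++ [q.1]), PySem.Set.add asg q.1) := by
          simp only [pvInnerA, hc, if_false, Bool.if_false_left]
          rw [pvCondA_eq]
          simp only [show (decide (q.2.2.1 ≤ s) || decide (q.2.1 < e)) = pvCond q.2 (s, e) from rfl, hcond]
          simp [PySem.List.pySetD_natCast, PySem.List.pyGetD_natCast]
          rw [List.getElem?_eq_getElem hk]
          rfl
        rw [hstep, ih _ _ hndt (by simpa using hk)]
        have hfc : ∀ q' ∈ L, (!PySem.Set.contains (PySem.Set.add asg q.1) q'.1 && pvCond q'.2 (s, e))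
            = (!PySem.Set.contains asg q'.1 && pvCond q'.2 (s, e)) := by
          intro q' hq'
          have : PySem.Set.contains (PySem.Set.add asg q.1) q'.1 = PySem.Set.contains asg q'.1 := by
            rw [Bool.eq_iff_iff]
            simp [PySem.Set.contains_iff, PySem.Set.mem_add, hqnot q' hq']
          rw [this]
        rw [List.filter_congr hfc]
        have hc' : q.1 ∉ asg := fun hmem => hc ((PySem.Set.contains_iff asg q.1).mpr hmem)
        rw [Prod.mk.injEq]
        constructor
        · simp [List.filter_cons, hc', hcond, List.set_set, List.getElem_set_self, List.append_assoc]
        · simp [List.filter_cons, hc', hcond, PySem.Set.update_cons]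
      · have hstep : pvInnerA s e (k : Int) (bs, asg) q = (bs, asg) := by
          simp only [pvInnerA, hc, if_false, Bool.if_false_left]
          rw [pvCondA_eq]
          simp only [show (decide (q.2.2.1 ≤ s) || decide (q.2.1 < e)) = pvCond q.2 (s, e) from rfl, hcond]
          simp
        rw [hstep, ih bs asg hndt hk]
        simp [List.filter_cons, hcond]

-- A's outer loop, characterised
theorem pvOuterA_spec (merged : List (Int × Int × String)) (bnds : List (Int × Int)) :
    ∀ (bsuf : List (Int × Int)) (k : Nat) (bs : List (List Int)) (asg : PySem.Set Int),
    bnds.drop k = bsuf →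
    bs.length = bnds.length →
    (∀ j (hj : j < bs.length), bs[j] = if j < k then pvMt merged bnds j else []) →
    (∀ x : Int, x ∈ asg ↔ ∃ q ∈ PySem.List.enumerate merged, q.1 = x ∧ pvAsgB bnds k q.2 = true) →
    let R := (PySem.List.enumerate bsuf (k : Int)).foldl
      (fun acc jp => (PySem.List.enumerate merged).foldl (pvInnerA jp.2.1 jp.2.2 jp.1) acc) (bs, asg)
    R.1.length = bnds.length ∧ (∀ j (hj : j < R.1.length), R.1[j] = pvMt merged bnds j) ∧
      (∀ x : Int, x ∈ R.2 ↔ ∃ q ∈ PySem.List.enumerate merged, q.1 = x ∧ pvAsgB bnds bnds.length q.2 = true) := by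
  intro bsuf
  induction bsuf with
  | nil =>
    intro k bs asg hdrop hlen hbs hasg
    have hk : bnds.length ≤ k := by
      by_contra h
      have := congrArg List.length hdrop
      simp [List.length_drop] at this
      omega
    simp only [PySem.List.enumerate_nil, List.foldl_nil]
    refine ⟨hlen, ?_, ?_⟩
    · intro j hj
      have := hbs j hj
      rw [if_pos (by omega : j < k)] at this
      exact this
    · intro x
      rw [hasg x]
      have hT : bnds.take k = bnds.take bnds.length := by
        rw [List.take_of_length_le hk, List.take_length]
      constructor <;> (rintro ⟨q, hq, h1, h2⟩; exact ⟨q, hq, h1, by simpa [pvAsgB, hT] using h2⟩)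
  | cons b rest ih =>
    intro k bs asg hdrop hlen hbs hasg
    have hk : k < bnds.length := by
      by_contra h
      rw [List.drop_eq_nil_of_le (by omega)] at hdrop
      exact absurd hdrop (by simp)
    have hbk : bnds[k] = b := by
      have h0 : (bnds.drop k)[0]'(by rw [hdrop]; simp) = b := by
        simp [hdrop]
      rw [List.getElem_drop] at h0
      simpa using h0
    have hrest : bnds.drop (k + 1) = rest := by
      have : bnds.drop (k + 1) = (bnds.drop k).drop 1 := by
        rw [List.drop_drop]
      rw [this, hdrop]
      rfl
    rw [PySem.List.enumerate_cons, List.foldl_cons]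
    have hklen : k < bs.length := by omega
    rw [pvInnerA_spec b.1 b.2 k (PySem.List.enumerate merged) bs asg (pvEnum_fst_nodup _ _) hklen]
    have hfc : ∀ q ∈ PySem.List.enumerate merged,
        (!PySem.Set.contains asg q.1 && pvCond q.2 (b.1, b.2)) = (pvFm bnds q.2 == some (k : Int)) := by
      intro q hq
      have hcontains : PySem.Set.contains asg q.1 = pvAsgB bnds k q.2 := by
        rw [Bool.eq_iff_iff, PySem.Set.contains_iff, hasg]
        constructor
        · rintro ⟨q', hq', h1, h2⟩
          have := pvEnum_fst_inj hq' hq h1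
          subst this
          exact h2
        · intro h
          exact ⟨q, hq, rfl, h⟩
      rw [hcontains]
      have : pvCond q.2 (b.1, b.2) = pvCond q.2 bnds[k] := by rw [hbk]
      rw [this, pvPick_eq bnds k hk q.2]
    rw [List.filter_congr hfc]
    have hpicked : ((PySem.List.enumerate merged).filter (fun q => pvFm bnds q.2 == some (k : Int))).map (·.1)
        = pvMt merged bnds k := rfl
    rw [hpicked]
    have hbsk : bs[k]'hklen = [] := by
      have := hbs k hklen
      rwa [if_neg (by omega)] at this
    rw [hbsk]
    have hstep : ((k : Int) + 1) = ((k + 1 : Nat) : Int) := by push_cast; ring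
    rw [hstep]
    refine ih (k + 1) _ _ hrest (by simpa using hlen) ?_ ?_
    · intro j hj
      rw [List.getElem_set]
      by_cases hjk : k = j
      · subst hjk
        rw [if_pos rfl, if_pos (by omega)]
        simp
      · rw [if_neg hjk]
        have := hbs j (by simpa using hj)
        rw [this]
        by_cases hjlt : j < k
        · rw [if_pos hjlt, if_pos (by omega)]
        · rw [if_neg hjlt, if_neg (by omega)]
    · intro x
      rw [PySem.Set.mem_update, hasg x]
      have hmt : x ∈ pvMt merged bnds k ↔
          ∃ q ∈ PySem.List.enumerate merged, q.1 = x ∧ (pvFm bnds q.2 == some (k : Int)) = true := by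
        simp only [pvMt, List.mem_map, List.mem_filter]
        constructor
        · rintro ⟨q, ⟨hq, hp⟩, rfl⟩
          exact ⟨q, hq, rfl, hp⟩
        · rintro ⟨q, hq, rfl, hp⟩
          exact ⟨q, ⟨hq, hp⟩, rfl⟩
      rw [hmt]
      have hAB : ∀ t, pvAsgB bnds (k + 1) t = (pvAsgB bnds k t || (pvFm bnds t == some (k : Int))) := by
        intro t
        rw [← pvPick_eq bnds k hk t]
        have htake : bnds.take (k + 1) = bnds.take k ++ [bnds[k]] := by
          rw [List.take_add_one, List.getElem?_eq_getElem hk]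
          rfl
        simp only [pvAsgB, htake, List.any_append, List.any_cons, List.any_nil, Bool.or_false]
        cases h1 : (bnds.take k).any (fun b => pvCond t b) <;> simp
      constructor
      · rintro (⟨q, hq, h1, h2⟩ | ⟨q, hq, h1, h2⟩)
        · exact ⟨q, hq, h1, by rw [hAB]; simp [h2]⟩
        · exact ⟨q, hq, h1, by rw [hAB]; simp [h2]⟩
      · rintro ⟨q, hq, h1, h2⟩
        rw [hAB] at h2
        rcases (by simpa using h2 : pvAsgB bnds k q.2 = true ∨ (pvFm bnds q.2 == some (k : Int)) = true) with h | h
        · exact Or.inl ⟨q, hq, h1, h⟩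
        · exact Or.inr ⟨q, hq, h1, h⟩

-- A's trailing loop (unassigned to the last bucket), characterised
theorem pvFinalA_spec (asg : PySem.Set Int) :
    ∀ (L : List Int) (ys : List (List Int)) (y : List Int),
    L.foldl (fun bs t_idx =>
        if PySem.Set.contains asg t_idx then bs
        else PySem.List.pySetD bs (-1) (PySem.List.pyGetD bs (-1) [] ++ [t_idx])) (ys ++ [y])
      = ys ++ [y ++ L.filter (fun t => !PySem.Set.contains asg t)] := by
  intro L
  induction L with
  | nil => intro ys y; simp
  | cons t L ih =>
    intro ys y
    rw [List.foldl_cons]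
    by_cases hc : PySem.Set.contains asg t
    · rw [if_pos hc, ih, List.filter_cons]
      have hc' := (PySem.Set.contains_iff asg t).mp hc
      simp [hc']
    · rw [if_neg hc, pvGetD_neg_one, pvSetD_neg_one, ih, List.filter_cons]
      have hc' : t ∉ asg := fun m => hc ((PySem.Set.contains_iff asg t).mpr m)
      simp [hc']

theorem pvList_eq_map_range {α : Type} (bs : List α) (n : Nat) (f : Nat → α)
    (hlen : bs.length = n) (h : ∀ j (hj : j < bs.length), bs[j] = f j) :
    bs = (List.range n).map f := by
  apply List.ext_getElem (by simp [hlen])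
  intro i h1 h2
  simp only [List.getElem_map, List.getElem_range]
  exact h i h1

theorem pvEnumFilter_eq (p : (Int × Int × String) → Bool) (merged : List (Int × Int × String)) (d : Int × Int × String) :
    ((PySem.List.enumerate merged).filter (fun q => p q.2)).map (·.1)
      = (PySem.List.pyRange 0 (PySem.List.len merged)).filter (fun t => p (PySem.List.pyGetD merged t d)) := by
  rw [PySem.List.enumerate_eq_map_pyRange merged d, List.filter_map, List.map_map]
  rw [show ((fun (x : Int × (Int × Int × String)) => x.1) ∘ fun j => (j, PySem.List.pyGetD merged j d)) = fun j => j from rfl]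
  rw [show ((fun (q : Int × (Int × Int × String)) => p q.2) ∘ fun j => (j, PySem.List.pyGetD merged j d)) = fun t => p (PySem.List.pyGetD merged t d) from rfl]
  simp

theorem pvExists_enum_iff (merged : List (Int × Int × String)) (d : Int × Int × String)
    (P : (Int × Int × String) → Bool) (t : Int) (h0 : 0 ≤ t) (hT : t < (merged.length : Int)) :
    (∃ q ∈ PySem.List.enumerate merged, q.1 = t ∧ P q.2 = true) ↔ P (PySem.List.pyGetD merged t d) = true := by
  constructor
  · rintro ⟨q, hq, h1, h2⟩
    rw [PySem.List.mem_enumerate_iff] at hq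
    obtain ⟨k, hk, rfl⟩ := hq
    simp only at h1 h2
    have hkt : ((k : Int)) = t := by omega
    rw [← hkt, PySem.List.pyGetD_natCast, List.getD_eq_getElem _ _ hk]
    exact h2
  · intro h
    refine ⟨(t, PySem.List.pyGetD merged t d), ?_, rfl, h⟩
    rw [PySem.List.mem_enumerate_iff]
    refine ⟨t.toNat, by omega, ?_⟩
    have h1 : (0 + (t.toNat : Int)) = t := by omega
    have h2 : PySem.List.pyGetD merged t d = merged[t.toNat]'(by omega) := by
      rw [PySem.List.pyGetD_of_nonneg _ _ h0, List.getD_eq_getElem _ _ (by omega)]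
    rw [h1, h2]


theorem pvUnassigned_eq (merged : List (Int × Int × String)) (bnds : List (Int × Int)) (asg : PySem.Set Int)
    (h : ∀ x : Int, x ∈ asg ↔ ∃ q ∈ PySem.List.enumerate merged, q.1 = x ∧ pvAsgB bnds bnds.length q.2 = true) :
    (PySem.List.pyRange 0 (merged.length : Int)).filter (fun t => !PySem.Set.contains asg t)
      = pvUm merged bnds := by
  have hum : pvUm merged bnds
      = (PySem.List.pyRange 0 (PySem.List.len merged)).filter
          (fun t => (pvFm bnds (PySem.List.pyGetD merged t (0, 0, ""))).isNone) := by
    unfold pvUm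
    exact pvEnumFilter_eq (fun tr => (pvFm bnds tr).isNone) merged (0, 0, "")
  rw [hum]
  rw [show PySem.List.len merged = (merged.length : Int) from by simp [pysem]]
  apply List.filter_congr
  intro t ht
  rw [PySem.List.mem_pyRange_one] at ht
  have hcont : PySem.Set.contains asg t
      = pvAsgB bnds bnds.length (PySem.List.pyGetD merged t (0, 0, "")) := by
    rw [Bool.eq_iff_iff, PySem.Set.contains_iff, h t]
    exact pvExists_enum_iff merged (0, 0, "") (fun tr => pvAsgB bnds bnds.length tr) t ht.1 ht.2
  rw [hcont]
  have hA : pvAsgB bnds bnds.length (PySem.List.pyGetD merged t (0, 0, ""))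
      = bnds.any (fun b => pvCond (PySem.List.pyGetD merged t (0, 0, "")) b) := by
    unfold pvAsgB
    rw [List.take_length]
  rw [hA, pvFm_none_iff]

-- ===== VERDICT (by name: the statement is the Claim_ definition above) =====
theorem assign_transcripts_to_segments_py_spec : Claim_equal_assign_transcripts_to_segments_py := by
  intro merged segments hdom hpre
  unfold Spec_assign_transcripts_to_segments_py
  obtain ⟨hne, hnil⟩ := hpre
  by_cases hS0 : segments = []
  · subst hS0
    rw [hnil rfl]
    rfl
  · clear hne hnil hdom
    have hSpos : 0 < segments.length := List.length_pos_iff.mpr hS0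
    have hSb : (segments.map pvBound).length = segments.length := by simp
    -- A: rewrite the outer loop as a fold over the enumerated bounds
    simp only [assign_transcripts_to_segments_py, assign_transcripts_to_segments_py_alt]
    have hA1 : (PySem.List.enumerate segments).foldl (pvOuterA merged)
          (segments.map (fun _ => ([] : List Int)), (PySem.Set.empty : PySem.Set Int))
        = (PySem.List.enumerate (segments.map pvBound) ((0 : Nat) : Int)).foldl
            (fun acc jp => (PySem.List.enumerate merged).foldl (pvInnerA jp.2.1 jp.2.2 jp.1) acc)
            (segments.map (fun _ => ([] : List Int)), PySem.Set.empty) := by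
      rw [pvEnum_map pvBound segments ((0 : Nat) : Int)]
      rw [List.foldl_map]
      rfl
    rw [hA1]
    have hOut := pvOuterA_spec merged (segments.map pvBound) (segments.map pvBound) 0
      (segments.map (fun _ => ([] : List Int))) PySem.Set.empty rfl (by simp)
      (by intro j hj; simp) (by intro x; simp [PySem.Set.empty, pvAsgB])
    obtain ⟨h1, h2, h3⟩ := hOut
    -- A's buckets after the outer loop, as a map over range
    have hR : (List.foldl (fun acc jp => List.foldl (pvInnerA jp.2.1 jp.2.2 jp.1) acc (PySem.List.enumerate merged))
          (List.map (fun _ => ([] : List Int)) segments, PySem.Set.empty)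
          (PySem.List.enumerate (List.map pvBound segments) ((0 : Nat) : Int))).1
        = (List.range segments.length).map (pvMt merged (segments.map pvBound)) :=
      pvList_eq_map_range _ _ _ (h1.trans hSb) h2
    rw [hR]
    have hsplit : (List.range segments.length).map (pvMt merged (segments.map pvBound))
        = ((List.range (segments.length - 1)).map (pvMt merged (segments.map pvBound)))
            ++ [pvMt merged (segments.map pvBound) (segments.length - 1)] := by
      conv_lhs => rw [show segments.length = (segments.length - 1) + 1 from by omega]
      rw [List.range_succ, List.map_append, List.map_singleton]
    rw [hsplit, pvFinalA_spec, pvUnassigned_eq merged (segments.map pvBound) _ h3]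
    -- B's pieces
    have hBB : (fun (seg : List (Int × Int × Int)) =>
        (((PySem.List.pyGet? seg 0).getD (0, 0, 0)).2.1, ((PySem.List.pyGet? seg (-1)).getD (0, 0, 0)).2.2)) = pvBound := rfl
    rw [hBB]
    have hfm : (fun t : Int × Int × String =>
        ((PySem.List.enumerate (segments.map pvBound)).find? (fun jp =>
          decide (t.2.1 ≤ jp.2.1) || decide (t.1 < jp.2.2))).map (·.1)) = pvFm (segments.map pvBound) := by
      funext t
      rw [show (fun (jp : Int × (Int × Int)) => decide (t.2.1 ≤ jp.2.1) || decide (t.1 < jp.2.2))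
            = (fun jp => pvCond t jp.2) from rfl]
      rw [pvFind?_enum (fun b => pvCond t b) (segments.map pvBound) 0]
      unfold pvFm
      cases List.findIdx? (pvCond t) (segments.map pvBound) <;> simp
    rw [hfm]
    have hBout : (PySem.List.pyRange 0 (segments.length : Int)).map (fun j =>
          ((PySem.List.enumerate (merged.map (pvFm (segments.map pvBound)))).filter
            (fun p => p.2 == some j)).map (·.1))
        = (List.range segments.length).map (pvMt merged (segments.map pvBound)) := by
      rw [PySem.List.pyRange_zero_nat, List.map_map]
      apply List.map_congr_left
      intro k hk
      rw [Function.comp_apply, pvEnum_map (pvFm (segments.map pvBound)) merged 0, List.filter_map,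
        List.map_map]
      rfl
    rw [hBout]
    have hBum : ((PySem.List.enumerate (merged.map (pvFm (segments.map pvBound)))).filter
          (fun p => p.2.isNone)).map (·.1) = pvUm merged (segments.map pvBound) := by
      rw [pvEnum_map (pvFm (segments.map pvBound)) merged 0, List.filter_map, List.map_map]
      rfl
    rw [hBum]
    cases hAny : (merged.map (pvFm (segments.map pvBound))).any (fun x => x.isNone) with
    | true =>
      rw [if_pos rfl, hsplit, pvGetD_neg_one, pvSetD_neg_one]
    | false =>
      rw [if_neg (by decide)]
      have hUm : pvUm merged (segments.map pvBound) = [] := by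
        unfold pvUm
        rw [List.filter_eq_nil_iff.mpr ?_, List.map_nil]
        intro q hq
        rw [PySem.List.mem_enumerate_iff] at hq
        obtain ⟨k, hk, rfl⟩ := hq
        have hmem : pvFm (segments.map pvBound) merged[k] ∈ merged.map (pvFm (segments.map pvBound)) :=
          List.mem_map.mpr ⟨merged[k], List.getElem_mem hk, rfl⟩
        have := List.any_eq_false.mp hAny _ hmem
        simp [this]
      rw [hUm, List.append_nil, hsplit]
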